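-- pv_equiv track=rewrite | github.com/k-harada/AtCoder | ARC/ARC105/C.py | solve
-- ===== SOURCE A (Python) =====
-- from itertools import permutations
--
-- def solve(n, m, w_list, lv_list):
--
--     min_v = min([lv[1] for lv in lv_list])
--     max_w = max(w_list)
--     if max_w > min_v:
--         return -1
--
--     w_dict = dict()
--
--     # pow
--     for i in range(1, 2 ** n):
--         w = 0
--         for j in range(n):
--             if i & (2 ** j):
--                 w += w_list[j]
--         w_dict[w] = 0
--
--     # max_len
--     for l, v in lv_list:
--         for w in w_dict.keys():
--             if v < w:
--                 w_dict[w] = max(w_dict[w], l)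
--
--     res = 10 ** 9
--     for p in permutations(range(n), n):
--         d_list = [0]
--         for i in range(1, n):
--             w = w_list[p[i]]
--             d = 0
--             for j in range(i - 1, -1, -1):
--                 w += w_list[p[j]]
--                 d = max(d, d_list[j] + w_dict[w])
--             d_list.append(d)
--         res = min(res, d_list[-1])
--
--     return res
-- ===== SOURCE B (Python) =====
-- def solve(n, m, w_list, lv_list):
--     if max(w_list) > min(v for _, v in lv_list):
--         return -1
--
--     def gap(w):
--         g = 0
--         for l, v in lv_list:
--             if v < w:
--                 g = max(g, l)
--         return g
--
--     def best(remaining, cur, pairs):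
--         # pairs[j] = (total weight placed before camel j, camel j's minimal position)
--         if not remaining:
--             return pairs[-1][1] if pairs else 0
--         r = 10 ** 9
--         for k in range(len(remaining)):
--             w = remaining[k]
--             s = cur + w
--             d = 0
--             for pj, dj in pairs:
--                 d = max(d, dj + gap(s - pj))
--             r = min(r, best(remaining[:k] + remaining[k + 1:], s, pairs + [(cur, d)]))
--         return r
--
--     return best(w_list[:n], 0, [])
-- ===== Notes on version B (the rewrite author's own statement) =====
-- stated objective: alternative
-- what changed: B deletes A's staged pipeline (the 2^n bitmask subset-sum dictionary, the bridge relaxation pass over it, and the itertools.permutations loop with a backward per-permutation DP over a d_list) and instead runs one recursive backtracking search that places camels one at a time, carrying (prefix-weight, position) pairs and computing each needed gap by a direct scan of the bridge list.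
import Mathlib
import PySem

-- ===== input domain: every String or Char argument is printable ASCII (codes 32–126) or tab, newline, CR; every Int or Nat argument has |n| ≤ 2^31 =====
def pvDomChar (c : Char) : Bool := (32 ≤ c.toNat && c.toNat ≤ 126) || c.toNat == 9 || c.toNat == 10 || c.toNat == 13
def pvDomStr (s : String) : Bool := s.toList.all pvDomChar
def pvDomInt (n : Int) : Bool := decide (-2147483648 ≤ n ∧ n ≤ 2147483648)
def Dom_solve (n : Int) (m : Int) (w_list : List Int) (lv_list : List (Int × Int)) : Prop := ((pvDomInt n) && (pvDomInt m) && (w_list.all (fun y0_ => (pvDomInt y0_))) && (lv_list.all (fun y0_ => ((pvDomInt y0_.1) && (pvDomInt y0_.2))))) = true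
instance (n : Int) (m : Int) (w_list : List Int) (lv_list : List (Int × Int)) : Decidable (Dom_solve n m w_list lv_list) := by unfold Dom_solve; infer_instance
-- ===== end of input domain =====

-- B replaces A's staged passes (2^n subset-sum dictionary, bridge relaxation pass, permutation loop
-- with a backward per-permutation DP) by one recursive backtracking search that places camels one at
-- a time and scans the bridge list for each needed gap (objective: alternative; return value only).

-- ===== PORT A =====
-- 'w' of the subset encoded by bitmask i: the inner 'for j in range(n): if i & (2 ** j): w += w_list[j]'
-- (i ≥ 1 and n ≥ 0 whenever Python reaches this loop under Pre_, so Nat bitmasks are exact)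
def subsetW (nN : Nat) (w_list : List Int) (i : Nat) : Int :=
  (List.range nN).foldl
    (fun w j => if i &&& 2 ^ j ≠ 0 then w + PySem.List.pyGetD w_list (Int.ofNat j) 0 else w) 0

def solve (n : Int) (m : Int) (w_list : List Int) (lv_list : List (Int × Int)) : Int :=
  match PySem.List.min? (lv_list.map (fun lv => lv.2)) (fun x => x),
        PySem.List.max? w_list (fun x => x) with
  | some min_v, some max_w =>
    if max_w > min_v then -1
    else
      -- for i in range(1, 2 ** n): … w_dict[w] = 0   (range(1, 2**n) = [1, …, 2**n - 1]; n ≥ 0 under Pre_)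
      let d1 : PySem.Dict Int Int :=
        (List.range' 1 (2 ^ n.toNat - 1)).foldl
          (fun d i => d.insert (subsetW n.toNat w_list i) 0) PySem.Dict.empty
      -- for l, v in lv_list: for w in w_dict.keys(): if v < w: w_dict[w] = max(w_dict[w], l)
      let d2 : PySem.Dict Int Int :=
        lv_list.foldl
          (fun d lv =>
            d.keys.foldl
              (fun d' w => if lv.2 < w then d'.insert w (max (d'.getD w 0) lv.1) else d') d) d1
      -- for p in permutations(range(n), n): …
      (PySem.List.permutations (PySem.List.pyRange 0 n 1) n.toNat).foldl
        (fun res p =>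
          -- for i in range(1, n):  (indices as Nat; all list accesses are in range under Pre_)
          let d_list :=
            (List.range' 1 (n.toNat - 1)).foldl
              (fun d_list i =>
                -- w = w_list[p[i]]; d = 0; for j in range(i-1, -1, -1): w += w_list[p[j]]; d = max(d, d_list[j] + w_dict[w])
                let wd :=
                  ((List.range i).reverse).foldl
                    (fun (wd : Int × Int) j =>
                      let w := wd.1 + PySem.List.pyGetD w_list (p.getD j 0) 0
                      (w, max wd.2 (d_list.getD j 0 + d2.getD w 0)))
                    (PySem.List.pyGetD w_list (p.getD i 0) 0, 0)
                d_list ++ [wd.2])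
              [0]
          min res (d_list.getLastD 0))
        (10 ^ 9)
  | _, _ => 0  -- unreachable under Pre_: Python's min()/max() raise ValueError on an empty list

-- ===== PORT B =====
-- gap(w): longest bridge with capacity strictly below w, one scan over lv_list
def gapB (lv_list : List (Int × Int)) (w : Int) : Int :=
  lv_list.foldl (fun g lv => if lv.2 < w then max g lv.1 else g) 0

-- best(remaining, cur, pairs); the extra fuel argument (= remaining.length at every call, as the
-- recursive call passes the shorter list) only makes the Python recursion structural in Lean
def bestB (lvs : List (Int × Int)) : Nat → List Int → Int → List (Int × Int) → Int
  | 0, _, _, pairs => (pairs.getLastD (0, 0)).2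
  | fuel + 1, remaining, cur, pairs =>
    if remaining = [] then (pairs.getLastD (0, 0)).2
    else
      (List.range remaining.length).foldl
        (fun r k =>
          let w := remaining.getD k 0
          let s := cur + w
          let d := pairs.foldl (fun d pr => max d (pr.2 + gapB lvs (s - pr.1))) 0
          min r (bestB lvs fuel (remaining.take k ++ remaining.drop (k + 1)) s
                   (pairs ++ [(cur, d)])))
        (10 ^ 9)

def solve_alt (n : Int) (m : Int) (w_list : List Int) (lv_list : List (Int × Int)) : Int :=
  match PySem.List.max? w_list (fun x => x) with
  | none => 0  -- unreachable under Pre_: Python's max() raises ValueError on an empty list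
  | some max_w =>
    match PySem.List.min? (lv_list.map (fun lv => lv.2)) (fun x => x) with
    | none => 0  -- unreachable under Pre_ (empty lv_list)
    | some min_v =>
      if max_w > min_v then -1
      else
        let rem := PySem.List.slice w_list none (some n)
        bestB lv_list rem.length rem 0 []

-- ===== PRECONDITION & SPEC =====
-- Pre_ is exactly where Python A returns: both lists nonempty (else min/max raise ValueError), and
-- either some camel outweighs some bridge (A returns -1 before using n) or 0 ≤ n ≤ len(w_list)
-- (else range(1, 2**n) or w_list[j] raises).
def Pre_solve (n : Int) (m : Int) (w_list : List Int) (lv_list : List (Int × Int)) : Prop :=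
  w_list ≠ [] ∧ lv_list ≠ [] ∧
    ((∃ w ∈ w_list, ∃ lv ∈ lv_list, lv.2 < w) ∨ (0 ≤ n ∧ n ≤ w_list.length))
instance (n : Int) (m : Int) (w_list : List Int) (lv_list : List (Int × Int)) : Decidable (Pre_solve n m w_list lv_list) := by unfold Pre_solve; infer_instance

def pvWitness_solve : Int × Int × List Int × (List (Int × Int)) := (2, 2, [1, 2], [(3, 5), (1, 4)])

def Spec_solve (n : Int) (m : Int) (w_list : List Int) (lv_list : List (Int × Int)) (out : Int) : Prop := out = solve_alt n m w_list lv_list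
instance (n : Int) (m : Int) (w_list : List Int) (lv_list : List (Int × Int)) (out : Int) : Decidable (Spec_solve n m w_list lv_list out) := by unfold Spec_solve; infer_instance

-- ===== CLAIM (what is proved, stated in full; the proofs are below) =====
def Claim_equal_solve : Prop := ∀ (n : Int) (m : Int) (w_list : List Int) (lv_list : List (Int × Int)), Dom_solve n m w_list lv_list → Pre_solve n m w_list lv_list → Spec_solve n m w_list lv_list (solve n m w_list lv_list)

-- ===== LEMMAS AND PROOFS =====

-- --- generic fold facts ---
lemma foldl_add_map (f : Nat → Int) : ∀ (l : List Nat) (a : Int),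
    l.foldl (fun w j => w + f j) a = a + (l.map f).sum := by
  intro l
  induction l with
  | nil => intro a; simp
  | cons x t ih => intro a; simp only [List.foldl_cons, List.map_cons, List.sum_cons]; rw [ih]; ring

lemma foldl_max_shift (f : Nat → Int) : ∀ (l : List Nat) (d a : Int),
    l.foldl (fun d j => max d (f j)) (max d a) = max (l.foldl (fun d j => max d (f j)) d) a := by
  intro l
  induction l with
  | nil => intro d a; simp
  | cons x t ih =>
    intro d a
    simp only [List.foldl_cons]
    have h : max (max d a) (f x) = max (max d (f x)) a := by omega
    rw [h, ih]

lemma foldl_max_reverse (f : Nat → Int) : ∀ (l : List Nat) (d : Int),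
    l.reverse.foldl (fun d j => max d (f j)) d = l.foldl (fun d j => max d (f j)) d := by
  intro l
  induction l with
  | nil => intro d; rfl
  | cons x t ih =>
    intro d
    simp only [List.reverse_cons, List.foldl_append, List.foldl_cons, List.foldl_nil]
    rw [ih, foldl_max_shift]

-- min a (fold of mins starting c) pulls inside the fold
lemma foldl_min_min (f : List Int → Int) : ∀ (L : List (List Int)) (a c : Int),
    L.foldl (fun b q => min b (f q)) (min a c) = min a (L.foldl (fun b q => min b (f q)) c) := by
  intro L
  induction L with
  | nil => intro a c; rfl
  | cons q t ih =>
    intro a c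
    simp only [List.foldl_cons]
    rw [min_assoc, ih]

-- congruence of folds whose bodies agree below a bound the accumulator never leaves
lemma foldl_congr_le (C : Int) (f g : Int → Nat → Int) :
    ∀ (l : List Nat), (∀ a k, k ∈ l → a ≤ C → f a k = g a k ∧ f a k ≤ C) →
    ∀ (a : Int), a ≤ C → l.foldl f a = l.foldl g a := by
  intro l
  induction l with
  | nil => intro _ a _; rfl
  | cons k t ih =>
    intro h a ha
    simp only [List.foldl_cons]
    obtain ⟨he, hle⟩ := h a k (by simp) ha
    rw [← he]
    exact ih (fun a k' hk' => h a k' (by simp [hk'])) _ hle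

-- --- prefix sums of the permuted weights ---
def presum (w_list p : List Int) (k : Nat) : Int :=
  ((p.take k).map (fun x => PySem.List.pyGetD w_list x 0)).sum

lemma presum_succ (w_list p : List Int) (k : Nat) (hk : k < p.length) :
    presum w_list p (k + 1) = presum w_list p k + PySem.List.pyGetD w_list (p.getD k 0) 0 := by
  unfold presum
  have h : p.take (k + 1) = p.take k ++ [p.getD k 0] := by
    rw [List.take_succ, List.getElem?_eq_getElem hk]
    simp [List.getD_eq_getElem?_getD, List.getElem?_eq_getElem hk]
  rw [h, List.map_append, List.sum_append]
  simp

lemma presum_sub (w_list p : List Int) (j i : Nat) (hj : j ≤ i) (hi : i ≤ p.length) :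
    presum w_list p i - presum w_list p j
      = (((p.drop j).take (i - j)).map (fun x => PySem.List.pyGetD w_list x 0)).sum := by
  have h : p.take i = p.take j ++ (p.drop j).take (i - j) := by
    rw [← List.take_add]
    congr 1
    omega
  unfold presum
  rw [h, List.map_append, List.sum_append]
  ring

-- --- bitmask of a set of indices ---
def maskOf : List Nat → Nat
  | [] => 0
  | k :: q => 2 ^ k ||| maskOf q

lemma testBit_maskOf : ∀ (q : List Nat) (b : Nat), (maskOf q).testBit b = decide (b ∈ q) := by
  intro q
  induction q with
  | nil => intro b; simp [maskOf]
  | cons k t ih =>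
    intro b
    simp only [maskOf, Nat.testBit_lor, Nat.testBit_two_pow, ih, List.mem_cons]
    rcases eq_or_ne b k with h | h
    · simp [h]
    · simp [h, Ne.symm h]

lemma maskOf_lt (nN : Nat) : ∀ (q : List Nat), (∀ k ∈ q, k < nN) → maskOf q < 2 ^ nN := by
  intro q
  induction q with
  | nil =>
    intro _
    simp only [maskOf]
    exact pow_pos (by norm_num) nN
  | cons k t ih =>
    intro h
    have hk : k < nN := h k (by simp)
    exact Nat.or_lt_two_pow (Nat.pow_lt_pow_right (by norm_num) hk)
      (ih (fun x hx => h x (by simp [hx])))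

lemma maskOf_pos (q : List Nat) (h : q ≠ []) : 1 ≤ maskOf q := by
  cases q with
  | nil => exact absurd rfl h
  | cons k t =>
    by_contra hlt
    have h0 : maskOf (k :: t) = 0 := by omega
    have := testBit_maskOf (k :: t) k
    rw [h0] at this
    simp at this

-- --- subsetW characterisation ---
lemma subsetW_eq (nN : Nat) (w_list : List Int) (i : Nat) :
    subsetW nN w_list i
      = (((List.range nN).filter (fun j => i.testBit j)).map
          (fun j => PySem.List.pyGetD w_list (Int.ofNat j) 0)).sum := by
  unfold subsetW
  rw [PySem.List.foldl_congr_mem (List.range nN)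
      (fun w j => if i &&& 2 ^ j ≠ 0 then w + PySem.List.pyGetD w_list (Int.ofNat j) 0 else w)
      (fun w j => if i.testBit j then w + PySem.List.pyGetD w_list (Int.ofNat j) 0 else w) 0
      (by
        intro acc j _
        have hpos : 0 < (2 : Nat) ^ j := pow_pos (by norm_num) j
        have h : (i &&& 2 ^ j ≠ 0) ↔ i.testBit j = true := by
          rw [Nat.and_two_pow]
          cases hb : i.testBit j <;> simp
        by_cases hb : i.testBit j = true <;> simp [h, hb])]
  rw [PySem.List.foldl_if_eq_foldl_filter, foldl_add_map]
  simp

lemma subsetW_maskOf (nN : Nat) (w_list : List Int) (q : List Nat)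
    (hnd : q.Nodup) (hlt : ∀ k ∈ q, k < nN) :
    subsetW nN w_list (maskOf q)
      = (q.map (fun j => PySem.List.pyGetD w_list (Int.ofNat j) 0)).sum := by
  rw [subsetW_eq]
  have hperm : ((List.range nN).filter (fun j => (maskOf q).testBit j)).Perm q := by
    rw [List.perm_ext_iff_of_nodup (List.Nodup.filter _ (List.nodup_range)) hnd]
    intro a
    simp only [List.mem_filter, List.mem_range, testBit_maskOf, decide_eq_true_eq]
    exact ⟨fun h => h.2, fun h => ⟨hlt a h, h⟩⟩
  exact (hperm.map _).sum_eq

-- --- the dictionary built by A ---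
lemma d1_getD_zero (key : Nat → Int) : ∀ (l : List Nat) (d : PySem.Dict Int Int),
    (∀ x, d.getD x 0 = 0) →
    ∀ x, (l.foldl (fun d i => d.insert (key i) 0) d).getD x 0 = 0 := by
  intro l
  induction l with
  | nil => intro d h x; exact h x
  | cons i t ih =>
    intro d h x
    simp only [List.foldl_cons]
    refine ih _ (fun y => ?_) x
    rw [PySem.Dict.getD_insert]
    split_ifs with he
    · rfl
    · exact h y

lemma d1_mem_keys (key : Nat → Int) : ∀ (l : List Nat) (d : PySem.Dict Int Int) (x : Int),
    x ∈ (l.foldl (fun d i => d.insert (key i) 0) d).keys ↔ (∃ i ∈ l, key i = x) ∨ x ∈ d.keys := by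
  intro l
  induction l with
  | nil => intro d x; simp
  | cons i t ih =>
    intro d x
    simp only [List.foldl_cons]
    rw [ih]
    simp only [PySem.Dict.mem_keys_insert, List.mem_cons]
    constructor
    · rintro (h | h | h)
      · exact .inl ⟨h.choose, .inr h.choose_spec.1, h.choose_spec.2⟩
      · exact .inl ⟨i, .inl rfl, h.symm⟩
      · exact .inr h
    · rintro (⟨j, hj | hj, he⟩ | h)
      · subst hj; exact .inr (.inl he.symm)
      · exact .inl ⟨j, hj, he⟩
      · exact .inr (.inr h)

lemma d1_keys_nodup (key : Nat → Int) : ∀ (l : List Nat) (d : PySem.Dict Int Int),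
    d.keys.Nodup → (l.foldl (fun d i => d.insert (key i) 0) d).keys.Nodup := by
  intro l
  induction l with
  | nil => intro d h; exact h
  | cons i t ih =>
    intro d h
    simp only [List.foldl_cons]
    exact ih _ (PySem.Dict.nodup_keys_insert _ _ _ h)

-- --- the second pass over lv_list ---
lemma inner_getD : ∀ (ks : List Int), ks.Nodup → ∀ (d : PySem.Dict Int Int) (l v x : Int),
    (ks.foldl (fun d' w => if v < w then d'.insert w (max (d'.getD w 0) l) else d') d).getD x 0
      = if x ∈ ks ∧ v < x then max (d.getD x 0) l else d.getD x 0 := by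
  intro ks
  induction ks with
  | nil => intro _ d l v x; simp
  | cons w t ih =>
    intro hnd d l v x
    have hndt : t.Nodup := (List.nodup_cons.mp hnd).2
    have hwt : w ∉ t := (List.nodup_cons.mp hnd).1
    simp only [List.foldl_cons]
    rw [ih hndt]
    by_cases hxw : x = w
    · subst hxw
      have hxt : x ∉ t := hwt
      simp only [hxt, false_and, if_false, List.mem_cons, true_or, true_and]
      split_ifs with h1 <;> simp
    · have hmem : (x ∈ t) = (x ∈ w :: t) := by simp [List.mem_cons, hxw]
      have hget : ∀ (d0 : PySem.Dict Int Int),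
          (if v < w then d0.insert w (max (d0.getD w 0) l) else d0).getD x 0 = d0.getD x 0 := by
        intro d0
        split_ifs with h1
        · rw [PySem.Dict.getD_insert]; simp [hxw]
        · rfl
      rw [hget]
      by_cases hxt : x ∈ t <;> simp [hxt, hxw]

lemma inner_keys : ∀ (ks : List Int) (d : PySem.Dict Int Int) (l v : Int),
    (∀ w ∈ ks, w ∈ d.keys) →
    (ks.foldl (fun d' w => if v < w then d'.insert w (max (d'.getD w 0) l) else d') d).keys
      = d.keys := by
  intro ks
  induction ks with
  | nil => intro d _ _ _; rfl
  | cons w t ih =>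
    intro d l v h
    simp only [List.foldl_cons]
    have hw : w ∈ d.keys := h w (by simp)
    have hkeys : (if v < w then d.insert w (max (d.getD w 0) l) else d).keys = d.keys := by
      split_ifs with h1
      · exact PySem.Dict.keys_insert_of_contains d _ ((PySem.Dict.contains_iff_mem_keys d w).mpr hw)
      · rfl
    rw [ih _ l v (by intro y hy; rw [hkeys]; exact h y (by simp [hy])), hkeys]

lemma phase2_spec : ∀ (lvs : List (Int × Int)) (d : PySem.Dict Int Int), d.keys.Nodup →
    ((lvs.foldl (fun d lv => d.keys.foldl
        (fun d' w => if lv.2 < w then d'.insert w (max (d'.getD w 0) lv.1) else d') d) d).keys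
      = d.keys)
    ∧ ∀ x ∈ d.keys,
      (lvs.foldl (fun d lv => d.keys.foldl
          (fun d' w => if lv.2 < w then d'.insert w (max (d'.getD w 0) lv.1) else d') d) d).getD x 0
        = lvs.foldl (fun g lv => if lv.2 < x then max g lv.1 else g) (d.getD x 0) := by
  intro lvs
  induction lvs with
  | nil => intro d h; exact ⟨rfl, fun x _ => rfl⟩
  | cons lv t ih =>
    intro d h
    simp only [List.foldl_cons]
    have hkeys : (d.keys.foldl
        (fun d' w => if lv.2 < w then d'.insert w (max (d'.getD w 0) lv.1) else d') d).keys
        = d.keys := inner_keys d.keys d lv.1 lv.2 (fun w hw => hw)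
    have hnd' : (d.keys.foldl
        (fun d' w => if lv.2 < w then d'.insert w (max (d'.getD w 0) lv.1) else d') d).keys.Nodup := by
      rw [hkeys]; exact h
    obtain ⟨ihk, ihg⟩ := ih _ hnd'
    refine ⟨by rw [ihk, hkeys], ?_⟩
    intro x hx
    rw [ihg x (by rw [hkeys]; exact hx)]
    rw [inner_getD d.keys h d lv.1 lv.2 x]
    simp [hx]

-- --- every block weight is a subset sum recorded in A's dictionary ---
lemma segment_q (n : Int) (w_list : List Int) (p : List Int)
    (hperm : p.Perm (PySem.List.pyRange 0 n 1)) (i j : Nat) (hj : j < i) (hi : i < p.length) :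
    ∃ q : List Nat, q.Nodup ∧ (∀ k ∈ q, k < n.toNat) ∧ q ≠ [] ∧
      (q.map (fun k => PySem.List.pyGetD w_list (Int.ofNat k) 0)).sum
        = presum w_list p (i + 1) - presum w_list p j := by
  classical
  set s : List Int := (p.drop j).take (i + 1 - j) with hs
  have hsub : s.Sublist p := (List.take_sublist _ _).trans (List.drop_sublist _ _)
  have hpnd : p.Nodup := hperm.nodup_iff.mpr (PySem.List.nodup_pyRange_one 0 n)
  have hsnd : s.Nodup := hsub.nodup hpnd
  have hmem : ∀ x ∈ s, 0 ≤ x ∧ x < n := by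
    intro x hx
    have := hperm.subset (hsub.subset hx)
    exact PySem.List.mem_pyRange_one.mp this
  have hslen : s.length = i + 1 - j := by
    rw [hs, List.length_take, List.length_drop]
    omega
  have hsne : s ≠ [] := by
    intro hnil
    rw [hnil] at hslen
    simp at hslen
    omega
  refine ⟨s.map Int.toNat, ?_, ?_, ?_, ?_⟩
  · refine List.Nodup.map_on ?_ hsnd
    intro x hx y hy he
    have h1 := (hmem x hx).1
    have h2 := (hmem y hy).1
    omega
  · intro k hk
    rw [List.mem_map] at hk
    obtain ⟨x, hx, rfl⟩ := hk
    have := hmem x hx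
    omega
  · intro hnil
    exact hsne (List.map_eq_nil_iff.mp hnil)
  · rw [presum_sub w_list p j (i + 1) (by omega) (by omega)]
    rw [List.map_map]
    refine congrArg List.sum (List.map_congr_left ?_)
    intro x hx
    have h0 := (hmem x hx).1
    have hxx : Int.ofNat x.toNat = x := by
      cases x with
      | ofNat k => rfl
      | negSucc k => simp at h0
    simp only [Function.comp_apply, hxx]

lemma block_in_keys (n : Int) (w_list : List Int) (p : List Int)
    (hperm : p.Perm (PySem.List.pyRange 0 n 1)) (i j : Nat) (hj : j < i) (hi : i < p.length) :
    ∃ t ∈ List.range' 1 (2 ^ n.toNat - 1),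
      subsetW n.toNat w_list t = presum w_list p (i + 1) - presum w_list p j := by
  obtain ⟨q, hqnd, hqlt, hqne, hqsum⟩ := segment_q n w_list p hperm i j hj hi
  refine ⟨maskOf q, ?_, ?_⟩
  · rw [List.mem_range'_1]
    have h1 := maskOf_pos q hqne
    have h2 := maskOf_lt n.toNat q hqlt
    have h3 : 0 < 2 ^ n.toNat := pow_pos (by norm_num) n.toNat
    omega
  · rw [subsetW_maskOf n.toNat w_list q hqnd hqlt, hqsum]

-- A's dictionary, after both passes, returns gapB at every block weight
lemma dict_getD_block (n : Int) (w_list : List Int) (lv_list : List (Int × Int)) (p : List Int)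
    (hperm : p.Perm (PySem.List.pyRange 0 n 1)) (i j : Nat) (hj : j < i) (hi : i < p.length) :
    (lv_list.foldl
        (fun d lv => d.keys.foldl
          (fun d' w => if lv.2 < w then d'.insert w (max (d'.getD w 0) lv.1) else d') d)
        ((List.range' 1 (2 ^ n.toNat - 1)).foldl
          (fun d i => d.insert (subsetW n.toNat w_list i) 0) PySem.Dict.empty)).getD
      (presum w_list p (i + 1) - presum w_list p j) 0
      = gapB lv_list (presum w_list p (i + 1) - presum w_list p j) := by
  obtain ⟨t, ht, hts⟩ := block_in_keys n w_list p hperm i j hj hi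
  have hxkeys : presum w_list p (i + 1) - presum w_list p j
      ∈ ((List.range' 1 (2 ^ n.toNat - 1)).foldl
          (fun d i => d.insert (subsetW n.toNat w_list i) (0 : Int)) PySem.Dict.empty).keys := by
    rw [d1_mem_keys (subsetW n.toNat w_list) (List.range' 1 (2 ^ n.toNat - 1)) PySem.Dict.empty]
    exact Or.inl ⟨t, ht, hts⟩
  have hnd1 : ((List.range' 1 (2 ^ n.toNat - 1)).foldl
      (fun d i => d.insert (subsetW n.toNat w_list i) (0 : Int)) PySem.Dict.empty).keys.Nodup :=
    d1_keys_nodup _ _ _ PySem.Dict.nodup_keys_empty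
  obtain ⟨_, hg2⟩ := phase2_spec lv_list _ hnd1
  rw [hg2 _ hxkeys,
    d1_getD_zero (subsetW n.toNat w_list) _ _ (fun x => by simp [PySem.Dict.getD_empty])]
  rfl

-- --- A's backward inner loop, rephrased over block sums ---
lemma innerA_desc (w_list p dl : List Int) (d2 : PySem.Dict Int Int) (i : Nat)
    (hi : i < p.length) :
    ∀ (jlen : Nat), jlen ≤ i → ∀ (d : Int),
    (((List.range jlen).reverse).foldl
       (fun (wd : Int × Int) j =>
          (wd.1 + PySem.List.pyGetD w_list (p.getD j 0) 0,
           max wd.2 (dl.getD j 0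
             + d2.getD (wd.1 + PySem.List.pyGetD w_list (p.getD j 0) 0) 0)))
       (presum w_list p (i + 1) - presum w_list p jlen, d)).2
      = ((List.range jlen).reverse).foldl
          (fun d j => max d (dl.getD j 0
             + d2.getD (presum w_list p (i + 1) - presum w_list p j) 0)) d := by
  intro jlen
  induction jlen with
  | zero => intro _ d; rfl
  | succ k ih =>
    intro hk d
    have hkp : k < p.length := by omega
    have hw : presum w_list p (i + 1) - presum w_list p (k + 1)
        + PySem.List.pyGetD w_list (p.getD k 0) 0
        = presum w_list p (i + 1) - presum w_list p k := by
      rw [presum_succ w_list p k hkp]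
      ring
    rw [List.range_succ, List.reverse_append]
    simp only [List.reverse_singleton, List.singleton_append, List.foldl_cons]
    rw [hw]
    exact ih (by omega) _

-- ===== B-side machinery =====

-- one placement step of B: s = cur + w, d from the current pairs, append (cur, d)
def stepB (lvs : List (Int × Int)) (st : Int × List (Int × Int)) (w : Int) :
    Int × List (Int × Int) :=
  (st.1 + w,
   st.2 ++ [(st.1, st.2.foldl (fun d pr => max d (pr.2 + gapB lvs (st.1 + w - pr.1))) 0)])

-- the value B's search assigns to a complete placement order q (starting from cur/pairs)
def valSeq (lvs : List (Int × Int)) (cur : Int) (pairs : List (Int × Int)) (q : List Int) : Int :=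
  ((q.foldl (stepB lvs) (cur, pairs)).2.getLastD (0, 0)).2

-- B's backtracking = fold of valSeq over itertools-order permutations
lemma bestB_perm (lvs : List (Int × Int)) : ∀ (r : Nat) (remaining : List Int),
    remaining.length = r → ∀ (cur : Int) (pairs : List (Int × Int)),
    bestB lvs r remaining cur pairs
      = if remaining = [] then (pairs.getLastD (0, 0)).2
        else (PySem.List.permutations remaining r).foldl
              (fun a q => min a (valSeq lvs cur pairs q)) (10 ^ 9) := by
  intro r
  induction r with
  | zero =>
    intro remaining hlen cur pairs
    rw [List.length_eq_zero_iff] at hlen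
    subst hlen
    simp [bestB]
  | succ r ih =>
    intro remaining hlen cur pairs
    have hne : remaining ≠ [] := by
      intro h; rw [h] at hlen; simp at hlen
    simp only [bestB, hne, if_false]
    rw [PySem.List.permutations]
    rw [List.foldl_flatMap]
    refine foldl_congr_le (10 ^ 9) _ _ (List.range remaining.length) ?_ _ le_rfl
    intro a k hk ha
    rw [List.mem_range] at hk
    have hget : remaining[k]? = some (remaining.getD k 0) := by
      simp [List.getD_eq_getElem?_getD, List.getElem?_eq_getElem hk]
    constructor
    · simp only [hget]
      rw [← List.eraseIdx_eq_take_drop_succ]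
      have hlen' : (remaining.eraseIdx k).length = r := by
        rw [List.length_eraseIdx_of_lt hk]
        omega
      rw [ih _ hlen']
      have hcons : ∀ q : List Int,
          valSeq lvs (cur + remaining.getD k 0)
            (pairs ++ [(cur, pairs.foldl
              (fun d pr => max d (pr.2 + gapB lvs (cur + remaining.getD k 0 - pr.1))) 0)]) q
          = valSeq lvs cur pairs (remaining.getD k 0 :: q) := by
        intro q
        simp [valSeq, stepB]
      by_cases hek : remaining.eraseIdx k = []
      · have hr0 : r = 0 := by rw [hek] at hlen'; simpa using hlen'.symm
        subst hr0
        rw [hek]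
        simp only [PySem.List.permutations]
        simp [valSeq, stepB]
      · simp only [hek, if_false]
        rw [List.foldl_map]
        simp only [hcons]
        rw [← foldl_min_min]
        congr 1
        omega
    · have : min a (bestB lvs r (remaining.take k ++ remaining.drop (k + 1))
          (cur + remaining.getD k 0) (pairs ++ [(cur, pairs.foldl
            (fun d pr => max d (pr.2 + gapB lvs (cur + remaining.getD k 0 - pr.1))) 0)])) ≤ a :=
        min_le_left _ _
      omega

-- permutations commute with map
lemma permutations_map (f : Int → Int) : ∀ (r : Nat) (xs : List Int),
    PySem.List.permutations (xs.map f) r = (PySem.List.permutations xs r).map (List.map f) := by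
  intro r
  induction r with
  | zero => intro xs; rw [PySem.List.permutations, PySem.List.permutations]; rfl
  | succ r ih =>
    intro xs
    rw [PySem.List.permutations, PySem.List.permutations]
    rw [List.map_flatMap, List.length_map]
    refine List.flatMap_congr ?_
    intro k hk
    rw [List.getElem?_map]
    cases hx : xs[k]? with
    | none => rfl
    | some x =>
      simp only [Option.map_some]
      rw [List.eraseIdx_map, ih]
      simp [List.map_map, Function.comp]

-- the sliced remaining list is the index range mapped through w_list
lemma map_pyGetD_range_take (w_list : List Int) (n : Int) (h0 : 0 ≤ n)
    (hlen : n ≤ (w_list.length : Int)) :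
    (PySem.List.pyRange 0 n 1).map (fun i => PySem.List.pyGetD w_list i 0)
      = w_list.take n.toNat := by
  apply List.ext_getElem
  · rw [List.length_map, PySem.List.length_pyRange_one, List.length_take]
    omega
  · intro k h1 h2
    rw [List.getElem_map, PySem.List.getElem_pyRange_one, List.getElem_take]
    have hk : k < w_list.length := by
      rw [List.length_take] at h2
      omega
    rw [zero_add]
    rw [show ((k : Int)) = ((k : Nat) : Int) by rfl, PySem.List.pyGetD_natCast]
    rw [List.getD_eq_getElem?_getD, List.getElem?_eq_getElem hk]
    rfl

-- ===== the lockstep invariant between A's d_list and B's pairs =====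

-- A's d_list after the first k iterations of 'for i in range(1, n)'
def AD (w_list : List Int) (d2 : PySem.Dict Int Int) (p : List Int) (k : Nat) : List Int :=
  (List.range' 1 k).foldl
    (fun d_list i =>
      let wd :=
        ((List.range i).reverse).foldl
          (fun (wd : Int × Int) j =>
            let w := wd.1 + PySem.List.pyGetD w_list (p.getD j 0) 0
            (w, max wd.2 (d_list.getD j 0 + d2.getD w 0)))
          (PySem.List.pyGetD w_list (p.getD i 0) 0, 0)
      d_list ++ [wd.2])
    [0]

-- one A-iteration, with the dictionary lookups replaced by gapB (valid for i < n on a permutation)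
lemma AD_succ (n : Int) (w_list : List Int) (lv_list : List (Int × Int)) (p : List Int)
    (hperm : p.Perm (PySem.List.pyRange 0 n 1)) (hplen : p.length = n.toNat)
    (d2 : PySem.Dict Int Int)
    (hd2 : d2 = lv_list.foldl
        (fun d lv => d.keys.foldl
          (fun d' w => if lv.2 < w then d'.insert w (max (d'.getD w 0) lv.1) else d') d)
        ((List.range' 1 (2 ^ n.toNat - 1)).foldl
          (fun d i => d.insert (subsetW n.toNat w_list i) 0) PySem.Dict.empty))
    (k : Nat) (hk : k + 1 < n.toNat) :
    AD w_list d2 p (k + 1)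
      = AD w_list d2 p k ++
          [(List.range (k + 1)).foldl
            (fun d j => max d ((AD w_list d2 p k).getD j 0
               + gapB lv_list (presum w_list p (k + 2) - presum w_list p j))) 0] := by
  unfold AD
  rw [List.range'_concat, List.foldl_append, List.foldl_cons, List.foldl_nil]
  simp only [one_mul]
  refine congrArg (fun x => _ ++ [x]) ?_
  have hstart : PySem.List.pyGetD w_list (p.getD (1 + k) 0) 0
      = presum w_list p (1 + k + 1) - presum w_list p (1 + k) := by
    rw [presum_succ w_list p (1 + k) (by omega)]
    ring
  rw [hstart]
  rw [innerA_desc w_list p _ d2 (1 + k) (by omega) (1 + k) le_rfl 0]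
  rw [foldl_max_reverse]
  have h1k : 1 + k = k + 1 := by omega
  rw [h1k]
  apply PySem.List.foldl_congr_mem
  intro d j hj
  rw [List.mem_range] at hj
  rw [show k + 1 + 1 = k + 2 by rfl]
  rw [hd2, dict_getD_block n w_list lv_list p hperm (k + 1) j hj (by omega)]

lemma length_foldl_append (f : List Int → Nat → Int) : ∀ (l : List Nat) (init : List Int),
    (l.foldl (fun dl i => dl ++ [f dl i]) init).length = init.length + l.length := by
  intro l
  induction l with
  | nil => intro init; simp
  | cons i t ih =>
    intro init
    simp only [List.foldl_cons]
    rw [ih]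
    simp
    omega

lemma AD_length (w_list : List Int) (d2 : PySem.Dict Int Int) (p : List Int) (k : Nat) :
    (AD w_list d2 p k).length = k + 1 := by
  unfold AD
  refine (length_foldl_append _ _ _).trans ?_
  simp [List.length_range']
  omega

-- the invariant: after k+1 placements B's state is exactly (prefix sum, A's d-values so far)
lemma lockstep (n : Int) (w_list : List Int) (lv_list : List (Int × Int)) (p : List Int)
    (hperm : p.Perm (PySem.List.pyRange 0 n 1)) (hplen : p.length = n.toNat)
    (d2 : PySem.Dict Int Int)
    (hd2 : d2 = lv_list.foldl
        (fun d lv => d.keys.foldl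
          (fun d' w => if lv.2 < w then d'.insert w (max (d'.getD w 0) lv.1) else d') d)
        ((List.range' 1 (2 ^ n.toNat - 1)).foldl
          (fun d i => d.insert (subsetW n.toNat w_list i) 0) PySem.Dict.empty)) :
    ∀ (k : Nat), k + 1 ≤ n.toNat →
    ((p.map (fun x => PySem.List.pyGetD w_list x 0)).take (k + 1)).foldl (stepB lv_list) (0, [])
      = (presum w_list p (k + 1),
         (List.range (k + 1)).map
           (fun j => (presum w_list p j, (AD w_list d2 p k).getD j 0))) := by
  intro k
  induction k with
  | zero =>
    intro h1
    have hp0 : 0 < p.length := by omega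
    have htake : (p.map (fun x => PySem.List.pyGetD w_list x 0)).take 1
        = [PySem.List.pyGetD w_list (p.getD 0 0) 0] := by
      cases p with
      | nil => simp at hp0
      | cons a t => simp
    rw [htake, List.foldl_cons, List.foldl_nil]
    simp only [stepB, List.foldl_nil, List.nil_append]
    have h1' : presum w_list p 1 = 0 + PySem.List.pyGetD w_list (p.getD 0 0) 0 := by
      rw [show (1 : Nat) = 0 + 1 by rfl, presum_succ w_list p 0 hp0]
      simp [presum]
    rw [List.range_one]
    refine Prod.ext ?_ ?_
    · exact h1'.symm
    · simp [presum, AD]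
  | succ k ih =>
    intro hk1
    have hk : k + 1 ≤ n.toNat := by omega
    have hkp : k + 1 < p.length := by omega
    have htake : (p.map (fun x => PySem.List.pyGetD w_list x 0)).take (k + 2)
        = (p.map (fun x => PySem.List.pyGetD w_list x 0)).take (k + 1)
            ++ [PySem.List.pyGetD w_list (p.getD (k + 1) 0) 0] := by
      rw [List.take_succ]
      congr 1
      rw [List.getElem?_map, List.getElem?_eq_getElem hkp]
      simp [List.getD_eq_getElem?_getD, List.getElem?_eq_getElem hkp]
    rw [htake, List.foldl_append, List.foldl_cons, List.foldl_nil, ih hk]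
    simp only [stepB]
    have hsum : presum w_list p (k + 1) + PySem.List.pyGetD w_list (p.getD (k + 1) 0) 0
        = presum w_list p (k + 2) := by
      rw [presum_succ w_list p (k + 1) hkp]
    have hAD := AD_succ n w_list lv_list p hperm hplen d2 hd2 k (by omega)
    have hADlen := AD_length w_list d2 p k
    have hgetok : ∀ j, j < k + 1 →
        (AD w_list d2 p (k + 1)).getD j 0 = (AD w_list d2 p k).getD j 0 := by
      intro j hj
      rw [hAD, List.getD_append]
      omega
    have hd : ((List.range (k + 1)).map
          (fun j => (presum w_list p j, (AD w_list d2 p k).getD j 0))).foldl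
          (fun d pr => max d (pr.2 + gapB lv_list
            (presum w_list p (k + 1) + PySem.List.pyGetD w_list (p.getD (k + 1) 0) 0 - pr.1))) 0
        = (List.range (k + 1)).foldl
            (fun d j => max d ((AD w_list d2 p k).getD j 0
              + gapB lv_list (presum w_list p (k + 2) - presum w_list p j))) 0 := by
      rw [List.foldl_map]
      apply PySem.List.foldl_congr_mem
      intro d j _
      rw [hsum]
    refine Prod.ext ?_ ?_
    · simpa using hsum
    · simp only
      rw [hd]
      conv_rhs => rw [List.range_succ, List.map_append, List.map_cons, List.map_nil]
      congr 1
      · refine List.map_congr_left ?_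
        intro j hj
        rw [List.mem_range] at hj
        rw [hgetok j hj]
      · have hlast : (AD w_list d2 p (k + 1)).getD (k + 1) 0
            = (List.range (k + 1)).foldl
                (fun d j => max d ((AD w_list d2 p k).getD j 0
                  + gapB lv_list (presum w_list p (k + 2) - presum w_list p j))) 0 := by
          rw [hAD, List.getD_eq_getElem?_getD, List.getElem?_append_right (by omega), hADlen]
          simp
        rw [hlast]

-- B's leaf value on a full placement order equals A's last d-value
lemma valSeq_eq (n : Int) (w_list : List Int) (lv_list : List (Int × Int)) (p : List Int)
    (hperm : p.Perm (PySem.List.pyRange 0 n 1)) (hplen : p.length = n.toNat)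
    (hn1 : 1 ≤ n.toNat)
    (d2 : PySem.Dict Int Int)
    (hd2 : d2 = lv_list.foldl
        (fun d lv => d.keys.foldl
          (fun d' w => if lv.2 < w then d'.insert w (max (d'.getD w 0) lv.1) else d') d)
        ((List.range' 1 (2 ^ n.toNat - 1)).foldl
          (fun d i => d.insert (subsetW n.toNat w_list i) 0) PySem.Dict.empty)) :
    valSeq lv_list 0 [] (p.map (fun x => PySem.List.pyGetD w_list x 0))
      = (AD w_list d2 p (n.toNat - 1)).getLastD 0 := by
  obtain ⟨t, ht⟩ : ∃ t, n.toNat = t + 1 := ⟨n.toNat - 1, by omega⟩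
  have hfull : (p.map (fun x => PySem.List.pyGetD w_list x 0)).take (t + 1)
      = p.map (fun x => PySem.List.pyGetD w_list x 0) := by
    apply List.take_of_length_le
    rw [List.length_map, hplen, ht]
  have := lockstep n w_list lv_list p hperm hplen d2 hd2 t (by omega)
  rw [hfull] at this
  unfold valSeq
  rw [this]
  simp only [ht, Nat.add_sub_cancel]
  have hADlen := AD_length w_list d2 p t
  rw [List.range_succ, List.map_append, List.map_cons, List.map_nil]
  rw [List.getLastD_concat]
  simp only
  rw [List.getLastD_eq_getLast?, List.getLast?_eq_getElem?, hADlen]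
  simp only [Nat.add_sub_cancel]
  rw [List.getD_eq_getElem?_getD]

-- ===== VERDICT (by name: the statement is the Claim_ definition above) =====
theorem solve_spec : Claim_equal_solve := by
  intro n m w_list lv_list _ hpre
  obtain ⟨hwne, hlvne, hdisj⟩ := hpre
  show solve n m w_list lv_list = solve_alt n m w_list lv_list
  rcases hmin : PySem.List.min? (lv_list.map (fun lv => lv.2)) (fun x => x) with _ | mv
  · rw [PySem.List.min?_eq_none_iff] at hmin
    exact absurd (List.map_eq_nil_iff.mp hmin) hlvne
  rcases hmax : PySem.List.max? w_list (fun x => x) with _ | mw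
  · rw [PySem.List.max?_eq_none_iff] at hmax
    exact absurd hmax hwne
  simp only [solve, solve_alt, hmin, hmax]
  split_ifs with hcmp
  · rfl
  have hn : 0 ≤ n ∧ n ≤ (w_list.length : Int) := by
    rcases hdisj with ⟨w, hw, lv, hlv, hlt⟩ | h
    · exfalso
      have h1 : w ≤ mw := by simpa using PySem.List.max?_isMax hmax w hw
      have h2 : mv ≤ lv.2 := by
        simpa using PySem.List.min?_isMin hmin lv.2 (List.mem_map_of_mem hlv)
      omega
    · exact h
  have hslice : PySem.List.slice w_list none (some n) = w_list.take n.toNat :=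
    PySem.List.slice_to w_list hn.1
  have hmap := map_pyGetD_range_take w_list n hn.1 hn.2
  have hlenR : (PySem.List.pyRange 0 n 1).length = n.toNat := by
    rw [PySem.List.length_pyRange_one]
    simp
  have hremlen : (w_list.take n.toNat).length = n.toNat := by
    rw [List.length_take]
    omega
  rw [hslice, hremlen]
  rw [bestB_perm lv_list n.toNat (w_list.take n.toNat) hremlen 0 []]
  rcases Nat.eq_zero_or_pos n.toNat with h0 | hpos
  · -- n = 0: A folds over permutations [] 0 = [[]] with value 0; B's remaining list is empty
    have hn0 : n = 0 := by omega
    subst hn0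
    have hr : PySem.List.pyRange 0 0 1 = [] := by
      have := hlenR
      rw [h0] at this
      exact List.length_eq_zero_iff.mp this
    rw [hr]
    simp [h0]
  · have hne : w_list.take n.toNat ≠ [] := by
      intro h
      rw [h] at hremlen
      simp at hremlen
      omega
    simp only [hne, if_false]
    rw [← hmap, permutations_map, List.foldl_map]
    apply PySem.List.foldl_congr_mem
    intro res p hp
    have hperm : p.Perm (PySem.List.pyRange 0 n 1) := by
      apply PySem.List.perm_of_mem_permutations
      rwa [hlenR]
    have hplen : p.length = n.toNat := by rw [hperm.length_eq, hlenR]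
    refine congrArg (min res) ?_
    rw [valSeq_eq n w_list lv_list p hperm hplen hpos _ rfl]
    rfl
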